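-- pv_equiv track=rewrite | github.com/dmason-mlb/xray-importer | organize_xray_tests.py | build_repository_path
-- ===== SOURCE A (Python) =====
-- def build_repository_path(section: str, title: str) -> str:
--     """Build Test Repository path from section string"""
--     if not section:
--         return '/MLBAPP Test Repository/Uncategorized'
--
--     # Clean and split section path
--     parts = section.replace('\\', '/').split('/')
--     clean_parts = [p.strip() for p in parts if p.strip()]
--
--     # Determine base path based on section content
--     if 'Home Surface' in section or 'THome Surface' in section:
--         base = '/MLBAPP Test Repository/Home Surface'
--     elif 'News Surface' in section or 'News' in ' '.join(clean_parts):
--         base = '/MLBAPP Test Repository/News Surface'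
--     elif 'MLBAPP' in section:
--         base = '/MLBAPP Test Repository/Core App'
--     elif 'Additional' in section:
--         base = '/MLBAPP Test Repository/News Surface'
--     else:
--         base = '/MLBAPP Test Repository/Core App'
--
--     # Build sub-paths based on content
--     sub_paths = []
--
--     # Add category based on test title
--     if any(keyword in title.lower() for keyword in ['analytics', 'tracking', 'conviva']):
--         sub_paths.append('Analytics')
--     elif any(keyword in title.lower() for keyword in ['accessibility', 'a11y', 'talkback']):
--         sub_paths.append('Accessibility')
--     elif any(keyword in title.lower() for keyword in ['mixed feed', 'mxfd', 'feed']):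
--         sub_paths.append('Mixed Feed')
--     elif any(keyword in title.lower() for keyword in ['headline', 'stack']):
--         sub_paths.append('Headline Stack')
--     elif any(keyword in title.lower() for keyword in ['carousel', 'content carousel']):
--         sub_paths.append('Content Carousel')
--     elif any(keyword in title.lower() for keyword in ['team snapshot', 'snapshot']):
--         sub_paths.append('Team Snapshot')
--     elif any(keyword in title.lower() for keyword in ['standings']):
--         sub_paths.append('Standings')
--     elif any(keyword in title.lower() for keyword in ['player', 'follows']):
--         sub_paths.append('Player Features')
--     elif any(keyword in title.lower() for keyword in ['video', 'autoplay', 'mlb.tv', 'mlbtv']):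
--         sub_paths.append('Video')
--     elif any(keyword in title.lower() for keyword in ['story', 'stories', 'game stories']):
--         sub_paths.append('Stories')
--     elif any(keyword in title.lower() for keyword in ['ad', 'advertisement']):
--         sub_paths.append('Advertising')
--     elif any(keyword in title.lower() for keyword in ['surface', 'contentful', 'module']):
--         sub_paths.append('Surface Configuration')
--     elif any(keyword in title.lower() for keyword in ['auth', 'login', 'sign']):
--         sub_paths.append('Authentication')
--     elif any(keyword in title.lower() for keyword in ['settings', 'config']):
--         sub_paths.append('Settings')
--
--     # Combine paths
--     if sub_paths:
--         return f"{base}/{'/'.join(sub_paths)}"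
--     elif len(clean_parts) > 1:
--         # Use original section hierarchy
--         return f"{base}/{'/'.join(clean_parts[1:])}"
--     else:
--         return base
-- ===== SOURCE B (Python) =====
-- # Different strategy: instead of a first-match elif chain, flatten every keyword
-- # into a dict keyword -> rule priority, collect the priorities of ALL matches in
-- # one pass, and pick the rule with the minimal priority (min over ints).
--
-- _LABELS = ['Analytics', 'Accessibility', 'Mixed Feed', 'Headline Stack',
--            'Content Carousel', 'Team Snapshot', 'Standings', 'Player Features',
--            'Video', 'Stories', 'Advertising', 'Surface Configuration',
--            'Authentication', 'Settings']
--
-- _GROUPS = [['analytics', 'tracking', 'conviva'],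
--            ['accessibility', 'a11y', 'talkback'],
--            ['mixed feed', 'mxfd', 'feed'],
--            ['headline', 'stack'],
--            ['carousel', 'content carousel'],
--            ['team snapshot', 'snapshot'],
--            ['standings'],
--            ['player', 'follows'],
--            ['video', 'autoplay', 'mlb.tv', 'mlbtv'],
--            ['story', 'stories', 'game stories'],
--            ['ad', 'advertisement'],
--            ['surface', 'contentful', 'module'],
--            ['auth', 'login', 'sign'],
--            ['settings', 'config']]
--
-- _KW = {kw: i for i, kws in enumerate(_GROUPS) for kw in kws}
--
-- _BASES = ['Home Surface', 'News Surface', 'Core App', 'News Surface']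
--
--
-- def build_repository_path(section: str, title: str) -> str:
--     if not section:
--         return '/MLBAPP Test Repository/Uncategorized'
--
--     clean_parts = [p.strip() for p in section.replace('\\', '/').split('/')
--                    if p.strip()]
--
--     # base: minimal-priority satisfied condition, default 'Core App'
--     conds = ['Home Surface' in section or 'THome Surface' in section,
--              'News Surface' in section or 'News' in ' '.join(clean_parts),
--              'MLBAPP' in section,
--              'Additional' in section]
--     hits = [i for i, c in enumerate(conds) if c]
--     base = '/MLBAPP Test Repository/' + (_BASES[min(hits)] if hits else 'Core App')
--
--     # category: minimal-priority rule among ALL keywords present in the title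
--     t = title.lower()
--     ids = [i for kw, i in _KW.items() if kw in t]
--     tail = [_LABELS[min(ids)]] if ids else clean_parts[1:]
--     return '/'.join([base] + tail)
-- ===== Notes on version B (the rewrite author's own statement) =====
-- stated objective: alternative
-- what changed: Instead of A's first-match if/elif chains, B flattens every keyword into a keyword->priority dict, collects the priorities of ALL keywords present in the lowered title (and all satisfied base conditions) in one comprehension, and selects the rule by min() over those priorities; the final path is assembled with one '/'.join over [base]+tail.
import Mathlib
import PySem

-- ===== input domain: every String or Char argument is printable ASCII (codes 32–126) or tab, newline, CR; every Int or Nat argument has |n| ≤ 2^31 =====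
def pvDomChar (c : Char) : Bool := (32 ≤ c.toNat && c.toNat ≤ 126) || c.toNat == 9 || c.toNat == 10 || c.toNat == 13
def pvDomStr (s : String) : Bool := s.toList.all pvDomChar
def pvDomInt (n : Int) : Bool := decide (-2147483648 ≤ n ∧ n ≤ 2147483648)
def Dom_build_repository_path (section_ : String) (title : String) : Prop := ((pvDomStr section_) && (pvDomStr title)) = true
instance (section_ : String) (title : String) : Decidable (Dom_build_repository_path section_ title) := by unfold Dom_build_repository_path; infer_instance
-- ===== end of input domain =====

-- B replaces A's first-match if/elif chains by flattening every keyword into a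
-- keyword→priority map, collecting the priorities of ALL matches, and taking the
-- minimum (objective: alternative; same cost).

-- ===== PORT A =====
-- A's base-path if/elif chain, verbatim (helper extracted for readability)
def pvBaseA (section_ : String) (clean_parts : List String) : String :=
  if PySem.Str.isIn "Home Surface" section_ || PySem.Str.isIn "THome Surface" section_ then
    "/MLBAPP Test Repository/Home Surface"
  else if PySem.Str.isIn "News Surface" section_ || PySem.Str.isIn "News" (PySem.Str.join " " clean_parts) then
    "/MLBAPP Test Repository/News Surface"
  else if PySem.Str.isIn "MLBAPP" section_ then "/MLBAPP Test Repository/Core App"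
  else if PySem.Str.isIn "Additional" section_ then "/MLBAPP Test Repository/News Surface"
  else "/MLBAPP Test Repository/Core App"

-- A's sub_paths if/elif chain, verbatim (tl = title.lower())
def pvSubPathsA (tl : String) : List String :=
  if ["analytics", "tracking", "conviva"].any (fun k => PySem.Str.isIn k tl) then ["Analytics"]
  else if ["accessibility", "a11y", "talkback"].any (fun k => PySem.Str.isIn k tl) then ["Accessibility"]
  else if ["mixed feed", "mxfd", "feed"].any (fun k => PySem.Str.isIn k tl) then ["Mixed Feed"]
  else if ["headline", "stack"].any (fun k => PySem.Str.isIn k tl) then ["Headline Stack"]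
  else if ["carousel", "content carousel"].any (fun k => PySem.Str.isIn k tl) then ["Content Carousel"]
  else if ["team snapshot", "snapshot"].any (fun k => PySem.Str.isIn k tl) then ["Team Snapshot"]
  else if ["standings"].any (fun k => PySem.Str.isIn k tl) then ["Standings"]
  else if ["player", "follows"].any (fun k => PySem.Str.isIn k tl) then ["Player Features"]
  else if ["video", "autoplay", "mlb.tv", "mlbtv"].any (fun k => PySem.Str.isIn k tl) then ["Video"]
  else if ["story", "stories", "game stories"].any (fun k => PySem.Str.isIn k tl) then ["Stories"]
  else if ["ad", "advertisement"].any (fun k => PySem.Str.isIn k tl) then ["Advertising"]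
  else if ["surface", "contentful", "module"].any (fun k => PySem.Str.isIn k tl) then ["Surface Configuration"]
  else if ["auth", "login", "sign"].any (fun k => PySem.Str.isIn k tl) then ["Authentication"]
  else if ["settings", "config"].any (fun k => PySem.Str.isIn k tl) then ["Settings"]
  else []

def build_repository_path (section_ : String) (title : String) : String :=
  if section_ == "" then "/MLBAPP Test Repository/Uncategorized"
  else
    -- sep "/" ≠ "" so split? is exact here
    let parts := (PySem.Str.split? (PySem.Str.replace section_ "\\" "/") "/").getD []
    let clean_parts := (parts.filter (fun p => !(PySem.Str.strip p == ""))).map PySem.Str.strip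
    let base := pvBaseA section_ clean_parts
    let sub_paths := pvSubPathsA (PySem.Str.lower title)
    if !(sub_paths == []) then base ++ "/" ++ PySem.Str.join "/" sub_paths
    else if clean_parts.length > 1 then base ++ "/" ++ PySem.Str.join "/" (clean_parts.drop 1)
    else base

-- ===== PORT B =====
def pvLabels : List String :=
  ["Analytics", "Accessibility", "Mixed Feed", "Headline Stack",
   "Content Carousel", "Team Snapshot", "Standings", "Player Features",
   "Video", "Stories", "Advertising", "Surface Configuration",
   "Authentication", "Settings"]

def pvGroupsB : List (List String) :=
  [["analytics", "tracking", "conviva"],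
   ["accessibility", "a11y", "talkback"],
   ["mixed feed", "mxfd", "feed"],
   ["headline", "stack"],
   ["carousel", "content carousel"],
   ["team snapshot", "snapshot"],
   ["standings"],
   ["player", "follows"],
   ["video", "autoplay", "mlb.tv", "mlbtv"],
   ["story", "stories", "game stories"],
   ["ad", "advertisement"],
   ["surface", "contentful", "module"],
   ["auth", "login", "sign"],
   ["settings", "config"]]

-- _KW = {kw: i for i, kws in enumerate(_GROUPS) for kw in kws}  (all 35 keywords
-- are distinct, so the dict is exactly this flat keyword→priority list)
def pvKw : List (String × Nat) :=
  pvGroupsB.zipIdx.flatMap (fun gi => gi.1.map (fun kw => (kw, gi.2)))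

def pvBases : List String := ["Home Surface", "News Surface", "Core App", "News Surface"]

def build_repository_path_alt (section_ : String) (title : String) : String :=
  if section_ == "" then "/MLBAPP Test Repository/Uncategorized"
  else
    -- sep "/" ≠ "" so split? is exact here
    let clean_parts :=
      (((PySem.Str.split? (PySem.Str.replace section_ "\\" "/") "/").getD []).filter
        (fun p => !(PySem.Str.strip p == ""))).map PySem.Str.strip
    let conds : List Bool :=
      [PySem.Str.isIn "Home Surface" section_ || PySem.Str.isIn "THome Surface" section_,
       PySem.Str.isIn "News Surface" section_ || PySem.Str.isIn "News" (PySem.Str.join " " clean_parts),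
       PySem.Str.isIn "MLBAPP" section_,
       PySem.Str.isIn "Additional" section_]
    let hits := (conds.zipIdx.filter (fun p => p.1)).map (fun p => p.2)
    -- min(hits) if hits else default; the index is in range, so getD is exact
    let base := "/MLBAPP Test Repository/" ++
      (match PySem.List.min? hits (fun y => y) with
       | some m => pvBases.getD m "Core App"
       | none => "Core App")
    let t := PySem.Str.lower title
    let ids := (pvKw.filter (fun p => PySem.Str.isIn p.1 t)).map (fun p => p.2)
    let tail :=
      match PySem.List.min? ids (fun y => y) with
      | some m => [pvLabels.getD m ""]   -- _LABELS[min(ids)], index always in range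
      | none => clean_parts.drop 1
    PySem.Str.join "/" ([base] ++ tail)

-- ===== PRECONDITION & SPEC =====
def Spec_build_repository_path (section_ : String) (title : String) (out : String) : Prop := out = build_repository_path_alt section_ title
instance (section_ : String) (title : String) (out : String) : Decidable (Spec_build_repository_path section_ title out) := by unfold Spec_build_repository_path; infer_instance

-- ===== CLAIM (what is proved, stated in full; the proofs are below) =====
def Claim_equal_build_repository_path : Prop := ∀ (section_ : String) (title : String), Dom_build_repository_path section_ title → Spec_build_repository_path section_ title (build_repository_path section_ title)

-- ===== LEMMAS AND PROOFS =====

-- first index >= n at which the flag is true (the value A's elif chain selects)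
def pvFirstTrue (n : Nat) : List Bool -> Option Nat
  | [] => none
  | c :: cs => if c then some n else pvFirstTrue (n + 1) cs

-- the indices B collects, abstracted: one copy of n per matching keyword of group n
def pvGrpHits (t : String) (n : Nat) : List (List String) -> List Nat
  | [] => []
  | kws :: gs =>
      ((kws.map (fun kw => (kw, n))).filter (fun p => PySem.Str.isIn p.1 t)).map (fun p => p.2)
        ++ pvGrpHits t (n + 1) gs

-- boolean analogue for the base-condition list
def pvBoolHits (n : Nat) : List Bool -> List Nat
  | [] => []
  | c :: cs => (if c then [n] else []) ++ pvBoolHits (n + 1) cs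

theorem pv_foldl_min_ge {l : List Nat} {n : Nat} (h : forall x, x ∈ l -> n <= x) :
    l.foldl min n = n := by
  induction l with
  | nil => rfl
  | cons x xs ih =>
      have hx : min n x = n := Nat.min_eq_left (h x (by simp))
      simp only [List.foldl_cons, hx]
      exact ih (fun y hy => h y (by simp [hy]))

theorem pv_min_of_seg {seg rest : List Nat} {n : Nat}
    (hseg : forall x, x ∈ seg -> x = n) (hrest : forall x, x ∈ rest -> n <= x)
    (hne : seg ≠ []) :
    PySem.List.min? (seg ++ rest) (fun y => y) = some n := by
  cases seg with
  | nil => exact absurd rfl hne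
  | cons x xs =>
      have hx : x = n := hseg x (by simp)
      subst hx
      rw [List.cons_append, PySem.List.min?_id_cons]
      congr 1
      exact pv_foldl_min_ge (fun y hy => by
        rcases List.mem_append.mp hy with h | h
        · exact Nat.le_of_eq (hseg y (by simp [h])).symm
        · exact hrest y h)

theorem pv_seg_mem (t : String) (kws : List String) (n : Nat) :
    forall x, x ∈ ((kws.map (fun kw => (kw, n))).filter
        (fun p => PySem.Str.isIn p.1 t)).map (fun p => p.2) -> x = n := by
  intro x hx
  simp only [List.mem_map, List.mem_filter] at hx
  obtain ⟨p, ⟨⟨kw, _, hkw⟩, _⟩, hpx⟩ := hx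
  rw [← hpx, ← hkw]

theorem pv_grpHits_ge (t : String) (gs : List (List String)) (n : Nat) :
    forall x, x ∈ pvGrpHits t n gs -> n <= x := by
  induction gs generalizing n with
  | nil => simp [pvGrpHits]
  | cons kws gs ih =>
      intro x hx
      rcases List.mem_append.mp hx with h | h
      · exact Nat.le_of_eq (pv_seg_mem t kws n x h).symm
      · exact Nat.le_of_succ_le (ih (n + 1) x h)

-- the minimum of all collected keyword priorities = the first matching group
theorem pv_min_grpHits (t : String) (gs : List (List String)) (n : Nat) :
    PySem.List.min? (pvGrpHits t n gs) (fun y => y)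
      = pvFirstTrue n (gs.map (fun kws => kws.any (fun k => PySem.Str.isIn k t))) := by
  induction gs generalizing n with
  | nil => simp [pvGrpHits, pvFirstTrue, PySem.List.min?]
  | cons kws gs ih =>
      simp only [pvGrpHits, List.map_cons, pvFirstTrue]
      by_cases hany : kws.any (fun k => PySem.Str.isIn k t) = true
      · rw [if_pos hany]
        apply pv_min_of_seg (pv_seg_mem t kws n)
          (fun x hx => Nat.le_of_succ_le (pv_grpHits_ge t gs (n + 1) x hx))
        simp only [List.any_eq_true] at hany
        obtain ⟨k, hk, hkt⟩ := hany
        intro hemp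
        have hmem : (k, n) ∈ (kws.map (fun kw => (kw, n))).filter
            (fun p => PySem.Str.isIn p.1 t) := by
          simp only [List.mem_filter, List.mem_map]
          exact ⟨⟨k, hk, rfl⟩, hkt⟩
        have := List.map_eq_nil_iff.mp hemp
        rw [this] at hmem
        simp at hmem
      · rw [if_neg hany]
        have hseg : (kws.map (fun kw => (kw, n))).filter
            (fun p => PySem.Str.isIn p.1 t) = [] := by
          rw [List.filter_eq_nil_iff]
          intro p hp
          simp only [List.mem_map] at hp
          obtain ⟨kw, hkw, hpe⟩ := hp
          subst hpe
          rw [List.any_eq_true] at hany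
          simp only [Bool.not_eq_true]
          by_contra hc
          simp only [Bool.not_eq_false] at hc
          exact hany ⟨kw, hkw, hc⟩
        rw [hseg, List.map_nil, List.nil_append]
        exact ih (n + 1)

theorem pv_boolHits_ge (cs : List Bool) (n : Nat) :
    forall x, x ∈ pvBoolHits n cs -> n <= x := by
  induction cs generalizing n with
  | nil => simp [pvBoolHits]
  | cons c cs ih =>
      intro x hx
      rcases List.mem_append.mp hx with h | h
      · rcases Bool.eq_false_or_eq_true c with hc | hc <;> simp [hc] at h
        omega
      · exact Nat.le_of_succ_le (ih (n + 1) x h)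

-- same statement for the boolean condition list
theorem pv_min_boolHits (cs : List Bool) (n : Nat) :
    PySem.List.min? (pvBoolHits n cs) (fun y => y) = pvFirstTrue n cs := by
  induction cs generalizing n with
  | nil => simp [pvBoolHits, pvFirstTrue, PySem.List.min?]
  | cons c cs ih =>
      simp only [pvBoolHits, pvFirstTrue]
      by_cases hc : c = true
      · rw [if_pos hc, if_pos hc]
        apply pv_min_of_seg (by intro x hx; simpa using hx)
          (fun x hx => Nat.le_of_succ_le (pv_boolHits_ge cs (n + 1) x hx))
        simp
      · rw [if_neg hc, if_neg hc]
        simpa using ih (n + 1)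

-- B's zipIdx/filter/map comprehension is the abstract boolean hit list
theorem pv_zipIdx_hits (cs : List Bool) (n : Nat) :
    ((cs.zipIdx n).filter (fun p => p.1)).map (fun p => p.2) = pvBoolHits n cs := by
  induction cs generalizing n with
  | nil => rfl
  | cons c cs ih =>
      simp only [List.zipIdx, pvBoolHits]
      by_cases hc : c = true
      · simp [hc, ih]
      · simp [hc, ih]

-- B's flat-keyword hit list is the abstract group hit list
theorem pv_ids_eq (t : String) :
    (pvKw.filter (fun p => PySem.Str.isIn p.1 t)).map (fun p => p.2)
      = pvGrpHits t 0 pvGroupsB := by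
  simp only [pvKw, pvGroupsB, pvGrpHits, List.zipIdx, List.flatMap_cons,
    List.flatMap_nil, List.filter_append, List.map_append, List.append_nil]

-- join "/" (x :: tail) = x ++ "/" ++ join "/" tail for nonempty tail; = x for []
theorem pv_join_cons (x y : String) (tl : List String) :
    PySem.Str.join "/" (x :: y :: tl) = x ++ "/" ++ PySem.Str.join "/" (y :: tl) := by
  apply String.toList_inj.mp
  simp [PySem.Str.toList_join, PySem.Chars.join_cons_cons]

theorem pv_join_one (x : String) : PySem.Str.join "/" [x] = x := by
  apply String.toList_inj.mp
  simp [PySem.Str.toList_join, PySem.Chars.join_singleton]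

-- B's base expression equals A's base if/elif chain
theorem pv_base_eq (s : String) (cp : List String) :
    ("/MLBAPP Test Repository/" ++
      (match PySem.List.min?
          (((([PySem.Str.isIn "Home Surface" s || PySem.Str.isIn "THome Surface" s,
               PySem.Str.isIn "News Surface" s || PySem.Str.isIn "News" (PySem.Str.join " " cp),
               PySem.Str.isIn "MLBAPP" s,
               PySem.Str.isIn "Additional" s] : List Bool).zipIdx).filter
              (fun p => p.1)).map (fun p => p.2)) (fun y => y) with
       | some m => pvBases.getD m "Core App"
       | none => "Core App")) = pvBaseA s cp := by
  rw [pv_zipIdx_hits, pv_min_boolHits]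
  unfold pvBaseA
  simp only [pvFirstTrue]
  split_ifs <;> rfl

-- B's minimal keyword priority selects exactly A's first matching rule
theorem pv_sub_eq (tl : String) :
    (match PySem.List.min?
        ((pvKw.filter (fun p => PySem.Str.isIn p.1 tl)).map (fun p => p.2)) (fun y => y) with
     | some m => [pvLabels.getD m ""]
     | none => ([] : List String)) = pvSubPathsA tl := by
  rw [pv_ids_eq, pv_min_grpHits]
  unfold pvSubPathsA
  simp only [pvGroupsB, List.map_cons, List.map_nil, pvFirstTrue,
    apply_ite (fun o : Option Nat => match o with
               | some m => [pvLabels.getD m ""]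
               | none => ([] : List String))]
  rfl

-- ===== VERDICT (by name: the statement is the Claim_ definition above) =====
theorem build_repository_path_spec : Claim_equal_build_repository_path := by
  intro s t _
  unfold Spec_build_repository_path build_repository_path build_repository_path_alt
  by_cases hs : s == ""
  · simp [hs]
  · simp only [hs, Bool.false_eq_true, if_false]
    rw [pv_base_eq]
    have hsub := pv_sub_eq (PySem.Str.lower t)
    cases hm : PySem.List.min?
        ((pvKw.filter (fun p => PySem.Str.isIn p.1 (PySem.Str.lower t))).map (fun p => p.2))
        (fun y => y) with
    | some m =>
        rw [hm] at hsub
        simp only [← hsub, List.cons_append, List.nil_append, pv_join_cons, pv_join_one]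
        rfl
    | none =>
        rw [hm] at hsub
        simp only [← hsub, List.cons_append, List.nil_append]
        cases hcp : ((((PySem.Str.split? (PySem.Str.replace s "\\" "/") "/").getD []).filter
            (fun p => !(PySem.Str.strip p == ""))).map PySem.Str.strip) with
        | nil => simp [pv_join_one]
        | cons a cps =>
            cases cps with
            | nil => simp [pv_join_one]
            | cons b l => simp [pv_join_cons]
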